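-- pv_equiv track=rewrite | github.com/s-umanap/ProblemaP1-Dalgo | ProblemaP1.py | individual_options
-- ===== SOURCE A (Python) =====
-- def identify_letters(Chain,Subchain):
--
--     different = []
--     for compare in range(0,len(Chain)):
--         if compare+1 < len(Chain):
--             if Chain[compare]+Chain[compare+1] != Subchain:
--                 tupla = compare, compare+1
--                 different.append(tupla)
--
--     return different
--
-- def all_posibilities(Chain,Subchain,moves):
--     pos = identify_letters(Chain, Subchain)
--     posibilities = combination(pos, moves)
--     list_posibilities =[]
--     for x in posibilities:
--         list_posibilities.append(x)
--     return list_posibilities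
--
-- def individual_options(Chain,Subchain,moves):
--     posibilities=all_posibilities(Chain, Subchain, moves)
--     list_posibilities = []
--     for x in posibilities:
--         for y in x:
--             for z in y:
--                 if z not in list_posibilities:
--                     list_posibilities.append(z)
--     return list_posibilities
--
-- def combination(tuples, moves):
--     pool = tuple(tuples)
--     n = len(pool)
--     if moves > n:
--         return
--     indices = list(range(moves))
--     yield tuple(pool[i] for i in indices)
--     while True:
--         for i in reversed(range(moves)):
--             if indices[i] != i + n - moves:
--                 break
--         else:
--             return
--         indices[i] += 1
--         for j in range(i+1, moves):
--             indices[j] = indices[j-1] + 1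
--         yield tuple(pool[i] for i in indices)
-- ===== SOURCE B (Python) =====
-- def individual_options(Chain, Subchain, moves):
--     # One linear pass: indices of non-matching adjacent pairs, flattened with
--     # duplicates (a shared endpoint of two consecutive pairs) skipped.
--     pairs = [i for i in range(len(Chain) - 1) if Chain[i] + Chain[i + 1] != Subchain]
--     if moves <= 0 or moves > len(pairs):
--         return []
--     out = []
--     prev = None
--     for i in pairs:
--         if prev != i:
--             out.append(i)
--         out.append(i + 1)
--         prev = i + 1
--     return out
-- ===== Notes on version B (the rewrite author's own statement) =====
-- stated objective: simpler
-- what changed: A enumerates every C(n, moves)-element index combination of the non-matching adjacent pairs with a hand-rolled generator and dedups the flattened result with a 'not in' scan; B collects the same distinct indices in one linear pass over the pairs, skipping only the endpoint shared with the previous pair.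
import Mathlib
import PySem

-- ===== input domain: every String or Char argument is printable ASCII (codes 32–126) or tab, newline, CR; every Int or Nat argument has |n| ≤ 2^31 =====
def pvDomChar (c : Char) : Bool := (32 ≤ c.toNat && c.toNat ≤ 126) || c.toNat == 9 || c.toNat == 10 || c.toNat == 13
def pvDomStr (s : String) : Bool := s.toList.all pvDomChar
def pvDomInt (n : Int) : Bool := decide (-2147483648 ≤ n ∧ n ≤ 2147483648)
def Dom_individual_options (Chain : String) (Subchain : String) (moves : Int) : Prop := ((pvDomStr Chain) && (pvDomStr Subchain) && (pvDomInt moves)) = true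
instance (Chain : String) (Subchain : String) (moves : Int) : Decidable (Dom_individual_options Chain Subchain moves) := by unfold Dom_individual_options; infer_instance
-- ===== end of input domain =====

-- B replaces A's walk over all C(n, moves) index-combinations by one linear pass over the
-- non-matching adjacent pairs themselves (objective: simpler).

-- shared elementary expression: Python's `Chain[compare] + Chain[compare+1] != Subchain`
-- (both source programs contain this very expression; in-range under the guards both use)
def pvPairNe (Chain Subchain : String) (c : Int) : Bool :=
  decide (¬ ([PySem.List.pyGetD Chain.toList c ' ',
              PySem.List.pyGetD Chain.toList (c + 1) ' '] = Subchain.toList))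

-- ===== PORT A =====
def pvIdentifyLetters (Chain Subchain : String) : List (Int × Int) :=
  (PySem.List.pyRange 0 (Chain.toList.length : Int) 1).foldl
    (fun acc compare =>
      if compare + 1 < (Chain.toList.length : Int) then
        if pvPairNe Chain Subchain compare then acc ++ [(compare, compare + 1)] else acc
      else acc) []

def pvComboYield (pool : List (Int × Int)) (indices : List Int) : List (Int × Int) :=
  indices.map (fun i => PySem.List.pyGetD pool i (0, 0))

-- the `for i in reversed(range(moves)): … break / else: return` search
def pvFindBreak (indices : List Int) (n moves : Int) : Option Int :=
  (PySem.List.pyRange (moves - 1) (-1) (-1)).find?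
    (fun i => decide (PySem.List.pyGetD indices i 0 ≠ i + n - moves))

-- the `for j in range(i+1, moves): indices[j] = indices[j-1] + 1` refill
def pvFill (indices : List Int) (i moves : Int) : List Int :=
  (PySem.List.pyRange (i + 1) moves 1).foldl
    (fun ind j => PySem.List.pySetD ind j (PySem.List.pyGetD ind (j - 1) 0 + 1)) indices

-- the generator's `while True` loop (fuel-bounded; fuel only makes the recursion total,
-- (n+1)^moves bounds the number of remaining yields)
def pvCombosAux (pool : List (Int × Int)) (n moves : Int) : List Int → Nat → List (List (Int × Int))
  | _, 0 => []
  | indices, fuel + 1 =>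
    match pvFindBreak indices n moves with
    | none => []
    | some i =>
      let ind2 := pvFill (PySem.List.pySetD indices i (PySem.List.pyGetD indices i 0 + 1)) i moves
      pvComboYield pool ind2 :: pvCombosAux pool n moves ind2 fuel

def pvCombination (tuples : List (Int × Int)) (moves : Int) : List (List (Int × Int)) :=
  let n : Int := tuples.length
  if moves > n then []
  else
    let indices := PySem.List.pyRange 0 moves 1
    pvComboYield tuples indices ::
      pvCombosAux tuples n moves indices ((tuples.length + 1) ^ moves.toNat)

def pvAllPos (Chain Subchain : String) (moves : Int) : List (List (Int × Int)) :=
  (pvCombination (pvIdentifyLetters Chain Subchain) moves).foldl (fun acc x => acc ++ [x]) []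

def individual_options (Chain : String) (Subchain : String) (moves : Int) : List Int :=
  (pvAllPos Chain Subchain moves).foldl
    (fun acc x => x.foldl (fun acc2 y =>
      [y.1, y.2].foldl (fun acc3 z => if z ∈ acc3 then acc3 else acc3 ++ [z]) acc2) acc) []

-- ===== PORT B =====
def individual_options_alt (Chain : String) (Subchain : String) (moves : Int) : List Int :=
  let pairs : List Int :=
    (PySem.List.pyRange 0 ((Chain.toList.length : Int) - 1) 1).filter (pvPairNe Chain Subchain)
  if moves ≤ 0 ∨ moves > (pairs.length : Int) then []
  else
    (pairs.foldl
      (fun (st : List Int × Option Int) i =>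
        ((if st.2 ≠ some i then st.1 ++ [i] else st.1) ++ [i + 1], some (i + 1)))
      ([], none)).1

-- ===== PRECONDITION & SPEC =====
def Spec_individual_options (Chain : String) (Subchain : String) (moves : Int) (out : List Int) : Prop := out = individual_options_alt Chain Subchain moves
instance (Chain : String) (Subchain : String) (moves : Int) (out : List Int) : Decidable (Spec_individual_options Chain Subchain moves out) := by unfold Spec_individual_options; infer_instance

-- ===== CLAIM (what is proved, stated in full; the proofs are below) =====
def Claim_equal_individual_options : Prop := ∀ (Chain : String) (Subchain : String) (moves : Int), Dom_individual_options Chain Subchain moves → Spec_individual_options Chain Subchain moves (individual_options Chain Subchain moves)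

-- ===== LEMMAS AND PROOFS =====

-- the dedupicating accumulator of A's triple loop
def dd (acc l : List Int) : List Int :=
  l.foldl (fun a z => if z ∈ a then a else a ++ [z]) acc

def fp (y : Int × Int) : List Int := [y.1, y.2]

def flatP (pool : List (Int × Int)) : List Int := pool.flatMap fp

-- the invariant of the generator's index list
def pvInv (n m : Int) (ind : List Int) : Prop :=
  ind.length = m.toNat ∧
  ∀ k : Nat, k < m.toNat →
    0 ≤ PySem.List.pyGetD ind (k : Int) 0 ∧ PySem.List.pyGetD ind (k : Int) 0 ≤ (k : Int) + n - m

lemma dd_append (acc l l' : List Int) : dd acc (l ++ l') = dd (dd acc l) l' := by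
  simp [dd, List.foldl_append]

lemma mem_dd (acc l : List Int) (z : Int) : z ∈ dd acc l ↔ z ∈ acc ∨ z ∈ l := by
  induction l generalizing acc with
  | nil => simp [dd]
  | cons w l ih =>
    have h : dd acc (w :: l) = dd (if w ∈ acc then acc else acc ++ [w]) l := rfl
    rw [h, ih]
    split_ifs with hw <;> simp_all
    · constructor
      · tauto
      · rintro (h | rfl | h) <;> tauto
    · tauto

lemma dd_nop (acc l : List Int) (h : ∀ z ∈ l, z ∈ acc) : dd acc l = acc := by
  induction l generalizing acc with
  | nil => rfl
  | cons w l ih =>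
    have h1 : dd acc (w :: l) = dd (if w ∈ acc then acc else acc ++ [w]) l := rfl
    rw [h1, if_pos (h w (by simp))]
    exact ih acc (fun z hz => h z (by simp [hz]))

lemma foldInner (x : List (Int × Int)) (acc : List Int) :
    x.foldl (fun acc2 y =>
      [y.1, y.2].foldl (fun acc3 z => if z ∈ acc3 then acc3 else acc3 ++ [z]) acc2) acc
    = dd acc (flatP x) := by
  induction x generalizing acc with
  | nil => rfl
  | cons y x ih =>
    have h : flatP (y :: x) = fp y ++ flatP x := by simp [flatP]
    rw [List.foldl_cons, ih, h, dd_append]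
    rfl

lemma foldA_eq (combos : List (List (Int × Int))) (acc : List Int) :
    combos.foldl (fun acc x => x.foldl (fun acc2 y =>
        [y.1, y.2].foldl (fun acc3 z => if z ∈ acc3 then acc3 else acc3 ++ [z]) acc2) acc) acc
      = combos.foldl (fun acc x => dd acc (flatP x)) acc :=
  PySem.List.foldl_congr_mem _ _ _ acc (fun acc x _ => foldInner x acc)

lemma mapGetRange (k : Nat) (pool : List (Int × Int)) (d : Int × Int) (hk : k ≤ pool.length) :
    (PySem.List.pyRange 0 (k : Int) 1).map (fun i => PySem.List.pyGetD pool i d) = pool.take k := by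
  induction k with
  | zero => simp [PySem.List.pyRange_one_eq_nil (le_refl (0 : Int))]
  | succ k ih =>
    have hcast : ((k + 1 : Nat) : Int) = (k : Int) + 1 := by push_cast; ring
    have hlt : k < pool.length := by omega
    rw [hcast, PySem.List.pyRange_one_succ_right (by positivity), List.map_append,
      ih (by omega), List.map_singleton,
      PySem.List.pyGetD_eq_getElem pool d (by omega) (by exact_mod_cast hlt)]
    rw [List.take_succ, List.getElem?_eq_getElem hlt]
    simp

lemma fillFrom_length (t : Nat) (m a : Int) (l : List Int) (ht : t = (m - a).toNat) :
    ((PySem.List.pyRange a m 1).foldl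
      (fun ind j => PySem.List.pySetD ind j (PySem.List.pyGetD ind (j - 1) 0 + 1)) l).length
      = l.length := by
  induction t generalizing a l with
  | zero =>
    rw [PySem.List.pyRange_one_eq_nil (by omega)]
    rfl
  | succ t ih =>
    rw [PySem.List.pyRange_one_cons (by omega), List.foldl_cons,
      ih (a + 1) _ (by omega), PySem.List.length_pySetD]

lemma fillFrom_spec (t : Nat) (m : Int) (a : Int) (l : List Int) (ha : 1 ≤ a)
    (hlen : l.length = m.toNat) (ht : t = (m - a).toNat) (k : Nat) (hk : k < m.toNat) :
    PySem.List.pyGetD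
      ((PySem.List.pyRange a m 1).foldl
        (fun ind j => PySem.List.pySetD ind j (PySem.List.pyGetD ind (j - 1) 0 + 1)) l) (k : Int) 0
      = if (k : Int) < a then PySem.List.pyGetD l (k : Int) 0
        else PySem.List.pyGetD l (a - 1) 0 + ((k : Int) - a + 1) := by
  induction t generalizing a l with
  | zero =>
    rw [PySem.List.pyRange_one_eq_nil (by omega), List.foldl_nil, if_pos (by omega)]
  | succ t ih =>
    have ham : a < m := by omega
    have hanat : ((a.toNat : Nat) : Int) = a := by omega
    have haltlen : a.toNat < l.length := by omega
    rw [PySem.List.pyRange_one_cons ham, List.foldl_cons]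
    set v := PySem.List.pyGetD l (a - 1) 0 + 1 with hv
    have hset : PySem.List.pySetD l a v = PySem.List.pySetD l ((a.toNat : Nat) : Int) v := by
      rw [hanat]
    rw [hset]
    have hget : ∀ (km : Nat), PySem.List.pyGetD (PySem.List.pySetD l ((a.toNat : Nat) : Int) v) (km : Int) 0
        = if km = a.toNat then v else PySem.List.pyGetD l (km : Int) 0 :=
      fun km => PySem.List.pyGetD_pySetD_natCast l a.toNat km v 0 haltlen
    rw [ih (a + 1) _ (by omega) (by rw [PySem.List.length_pySetD]; exact hlen) (by omega)]
    have e1 : (a + 1 - 1 : Int) = ((a.toNat : Nat) : Int) := by omega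
    rw [e1]
    simp only [hget, if_true]
    split_ifs <;> omega

lemma fb_some (t : Nat) (a : Int) (q : Int → Bool) (i : Int) (ht : a + 1 = (t : Int))
    (h : (PySem.List.pyRange a (-1) (-1)).find? q = some i) :
    0 ≤ i ∧ i ≤ a ∧ q i = true ∧ ∀ k, i < k → k ≤ a → q k = false := by
  induction t generalizing a i with
  | zero =>
    rw [PySem.List.pyRange_neg_one_eq_nil (by omega)] at h
    simp at h
  | succ t ih =>
    rw [PySem.List.pyRange_neg_one_cons (by omega)] at h
    cases hq : q a with
    | true =>
      rw [List.find?_cons_of_pos hq] at h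
      obtain rfl : a = i := by injection h
      exact ⟨by omega, le_refl _, hq, fun k h1 h2 => absurd (lt_of_lt_of_le h1 h2) (lt_irrefl a)⟩
    | false =>
      rw [List.find?_cons_of_neg (by simp [hq])] at h
      obtain ⟨hi0, hia, hqi, hrest⟩ := ih (a - 1) i (by omega) h
      refine ⟨hi0, by omega, hqi, fun k h1 h2 => ?_⟩
      by_cases hk : k ≤ a - 1
      · exact hrest k h1 hk
      · have : k = a := by omega
        rw [this]; exact hq

lemma step_inv (n m : Int) (ind : List Int) (i : Int) (hm : 1 ≤ m) (_hmn : m ≤ n)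
    (hinv : pvInv n m ind) (hfb : pvFindBreak ind n m = some i) :
    pvInv n m (pvFill (PySem.List.pySetD ind i (PySem.List.pyGetD ind i 0 + 1)) i m) := by
  obtain ⟨hlen, hvals⟩ := hinv
  obtain ⟨hi0, hia, hqi, hrest⟩ :=
    fb_some m.toNat (m - 1) _ i (by omega) hfb
  have hqi' : PySem.List.pyGetD ind i 0 ≠ i + n - m := by
    simpa using hqi
  have hitnat : ((i.toNat : Nat) : Int) = i := by omega
  have hitlen : i.toNat < ind.length := by omega
  have hvi := hvals i.toNat (by omega)
  rw [hitnat] at hvi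
  set v := PySem.List.pyGetD ind i 0 with hv
  have hvbound : v + 1 ≤ i + n - m := by
    rcases lt_or_eq_of_le hvi.2 with h | h
    · omega
    · exact absurd h hqi'
  have hset : PySem.List.pySetD ind i (v + 1) = PySem.List.pySetD ind ((i.toNat : Nat) : Int) (v + 1) := by
    rw [hitnat]
  have hget : ∀ (km : Nat), PySem.List.pyGetD (PySem.List.pySetD ind ((i.toNat : Nat) : Int) (v + 1)) (km : Int) 0
      = if km = i.toNat then v + 1 else PySem.List.pyGetD ind (km : Int) 0 :=
    fun km => PySem.List.pyGetD_pySetD_natCast ind i.toNat km (v + 1) 0 hitlen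
  have hlen1 : (PySem.List.pySetD ind ((i.toNat : Nat) : Int) (v + 1)).length = m.toNat := by
    rw [PySem.List.length_pySetD]; exact hlen
  constructor
  · show (pvFill _ i m).length = m.toNat
    unfold pvFill
    rw [hset, fillFrom_length (m - (i + 1)).toNat m (i + 1) _ (by omega), hlen1]
  · intro k hk
    unfold pvFill
    rw [hset, fillFrom_spec (m - (i + 1)).toNat m (i + 1) _ (by omega) hlen1 (by omega) k hk]
    have hia1 : ((i + 1) - 1 : Int) = ((i.toNat : Nat) : Int) := by omega
    by_cases h1 : (k : Int) < i + 1
    · rw [if_pos h1, hget k]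
      by_cases h2 : k = i.toNat
      · rw [if_pos h2]
        constructor <;> omega
      · rw [if_neg h2]
        have := hvals k hk
        constructor <;> omega
    · rw [if_neg h1, hia1, hget i.toNat, if_pos rfl]
      constructor <;> omega

lemma yield_subset (pool : List (Int × Int)) (n m : Int) (ind : List Int)
    (hinv : pvInv n m ind) (hn : (n : Int) = pool.length) (hm : 1 ≤ m) (_hmn : m ≤ n) :
    ∀ y ∈ pvComboYield pool ind, y ∈ pool := by
  intro y hy
  obtain ⟨idx, hidx, rfl⟩ := List.mem_map.1 hy
  obtain ⟨hlen, hvals⟩ := hinv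
  obtain ⟨k, hk, rfl⟩ := List.mem_iff_getElem.1 hidx
  have hkm : k < m.toNat := by omega
  have hval := hvals k hkm
  have hgd : PySem.List.pyGetD ind (k : Int) 0 = ind[k] := by
    rw [PySem.List.pyGetD_natCast, List.getD_eq_getElem?_getD, List.getElem?_eq_getElem hk]
    rfl
  rw [hgd] at hval
  apply PySem.List.pyGetD_mem
  simp only [PySem.Raise.InRange]
  constructor <;> omega

lemma restNop (pool : List (Int × Int)) (n m : Int) (hn : (n : Int) = pool.length)
    (hm : 1 ≤ m) (hmn : m ≤ n) :
    ∀ (fuel : Nat) (ind : List Int) (acc : List Int), pvInv n m ind →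
      (∀ y ∈ pool, y.1 ∈ acc ∧ y.2 ∈ acc) →
      (pvCombosAux pool n m ind fuel).foldl (fun acc x => dd acc (flatP x)) acc = acc := by
  intro fuel
  induction fuel with
  | zero => intro ind acc _ _; rfl
  | succ fuel ih =>
    intro ind acc hinv hacc
    rw [pvCombosAux]
    cases hfb : pvFindBreak ind n m with
    | none => rfl
    | some i =>
      simp only [List.foldl_cons]
      have hinv2 := step_inv n m ind i hm hmn hinv hfb
      have hnop : dd acc (flatP (pvComboYield pool
          (pvFill (PySem.List.pySetD ind i (PySem.List.pyGetD ind i 0 + 1)) i m))) = acc := by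
        apply dd_nop
        intro z hz
        simp only [flatP, List.mem_flatMap] at hz
        obtain ⟨y, hy, hzy⟩ := hz
        have hyp := yield_subset pool n m _ hinv2 hn hm hmn y hy
        simp only [fp, List.mem_cons, List.not_mem_nil, or_false] at hzy
        rcases hzy with rfl | rfl
        · exact (hacc y hyp).1
        · exact (hacc y hyp).2
      rw [hnop]
      exact ih _ acc hinv2 hacc

lemma sweep (pool : List (Int × Int)) (n m : Int) (hn : (n : Int) = pool.length)
    (hm : 1 ≤ m) (hmn : m ≤ n) :
    ∀ (jn fuel : Nat) (j : Int), j = n - 1 - (jn : Int) → m - 1 ≤ j → jn ≤ fuel →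
      (pvCombosAux pool n m (PySem.List.pyRange 0 (m - 1) 1 ++ [j]) fuel).foldl
          (fun acc x => dd acc (flatP x)) (dd [] (flatP (pool.take (j + 1).toNat)))
        = dd [] (flatP pool) := by
  intro jn
  have hlenpre : (PySem.List.pyRange 0 (m - 1) 1).length = (m - 1).toNat := by
    rw [PySem.List.length_pyRange_one]; congr 1; omega
  have hSlen : ∀ j : Int, (PySem.List.pyRange 0 (m - 1) 1 ++ [j]).length = m.toNat := by
    intro j; rw [List.length_append, hlenpre]; simp; omega
  have hSget : ∀ (j : Int) (k : Nat), k < m.toNat →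
      PySem.List.pyGetD (PySem.List.pyRange 0 (m - 1) 1 ++ [j]) (k : Int) 0
        = if k < (m - 1).toNat then (k : Int) else j := by
    intro j k hk
    rw [PySem.List.pyGetD_natCast]
    by_cases h : k < (m - 1).toNat
    · rw [if_pos h]
      have hk' : k < (PySem.List.pyRange 0 (m - 1) 1).length := by omega
      rw [List.getD_eq_getElem?_getD, List.getElem?_append_left hk',
        List.getElem?_eq_getElem hk', PySem.List.getElem_pyRange_one]
      simp
    · rw [if_neg h]
      have hk' : k = (PySem.List.pyRange 0 (m - 1) 1).length := by omega
      rw [List.getD_eq_getElem?_getD, hk']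
      simp
  have hSinv : ∀ j : Int, m - 1 ≤ j → j ≤ n - 1 →
      pvInv n m (PySem.List.pyRange 0 (m - 1) 1 ++ [j]) := by
    intro j hj1 hj2
    refine ⟨hSlen j, fun k hk => ?_⟩
    rw [hSget j k hk]
    by_cases h : k < (m - 1).toNat
    · rw [if_pos h]; constructor <;> omega
    · rw [if_neg h]
      have : (k : Int) = m - 1 := by omega
      constructor <;> omega
  induction jn with
  | zero =>
    intro fuel j hj hj1 _
    have hj' : j = n - 1 := by omega
    subst hj'
    have htake : (n - 1 + 1).toNat = pool.length := by omega
    rw [htake, List.take_length]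
    exact restNop pool n m hn hm hmn fuel _ _ (hSinv _ hj1 (by omega))
      (fun y hy => ⟨(mem_dd _ _ _).2 (Or.inr (by
          simp only [flatP, List.mem_flatMap]; exact ⟨y, hy, by simp [fp]⟩)),
        (mem_dd _ _ _).2 (Or.inr (by
          simp only [flatP, List.mem_flatMap]; exact ⟨y, hy, by simp [fp]⟩))⟩)
  | succ jn ih =>
    intro fuel j hj hj1 hfuel
    obtain ⟨f, rfl⟩ : ∃ f, fuel = f + 1 := ⟨fuel - 1, by omega⟩
    have hjn1 : j < n - 1 := by omega
    rw [pvCombosAux]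
    have hmlen : ((m - 1).toNat : Int) = m - 1 := by omega
    have hfb : pvFindBreak (PySem.List.pyRange 0 (m - 1) 1 ++ [j]) n m = some (m - 1) := by
      unfold pvFindBreak
      rw [PySem.List.pyRange_neg_one_cons (by omega)]
      apply List.find?_cons_of_pos
      have hg := hSget j (m - 1).toNat (by omega)
      rw [hmlen] at hg
      rw [hg, if_neg (lt_irrefl _)]
      simp only [decide_eq_true_eq]
      omega
    rw [hfb]
    show (pvComboYield pool (pvFill (PySem.List.pySetD (PySem.List.pyRange 0 (m - 1) 1 ++ [j]) (m - 1)
            (PySem.List.pyGetD (PySem.List.pyRange 0 (m - 1) 1 ++ [j]) (m - 1) 0 + 1)) (m - 1) m) ::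
          pvCombosAux pool n m (pvFill (PySem.List.pySetD (PySem.List.pyRange 0 (m - 1) 1 ++ [j]) (m - 1)
            (PySem.List.pyGetD (PySem.List.pyRange 0 (m - 1) 1 ++ [j]) (m - 1) 0 + 1)) (m - 1) m) f).foldl
          (fun acc x => dd acc (flatP x)) (dd [] (flatP (pool.take (j + 1).toNat)))
        = dd [] (flatP pool)
    have hgetm1 : PySem.List.pyGetD (PySem.List.pyRange 0 (m - 1) 1 ++ [j]) (m - 1) 0 = j := by
      have hg := hSget j (m - 1).toNat (by omega)
      rw [hmlen] at hg
      rw [hg, if_neg (lt_irrefl _)]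
    have hsetS : PySem.List.pySetD (PySem.List.pyRange 0 (m - 1) 1 ++ [j]) (m - 1) (j + 1)
        = PySem.List.pyRange 0 (m - 1) 1 ++ [j + 1] := by
      rw [PySem.List.pySetD_of_nonneg _ _ (by omega), List.set_append,
        if_neg (by rw [hlenpre]; omega)]
      congr 1
      have : (m - 1).toNat - (PySem.List.pyRange 0 (m - 1) 1).length = 0 := by
        rw [hlenpre]; omega
      rw [this]
      rfl
    have hfill : pvFill (PySem.List.pyRange 0 (m - 1) 1 ++ [j + 1]) (m - 1) m
        = PySem.List.pyRange 0 (m - 1) 1 ++ [j + 1] := by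
      unfold pvFill
      have : (m - 1 + 1 : Int) = m := by omega
      rw [this, PySem.List.pyRange_one_eq_nil (le_refl m), List.foldl_nil]
    rw [hgetm1, hsetS, hfill]
    simp only [List.foldl_cons]
    have hyield : pvComboYield pool (PySem.List.pyRange 0 (m - 1) 1 ++ [j + 1])
        = pool.take (m - 1).toNat ++ [PySem.List.pyGetD pool (j + 1) (0, 0)] := by
      unfold pvComboYield
      rw [List.map_append, List.map_singleton]
      congr 1
      have := mapGetRange (m - 1).toNat pool (0, 0) (by omega)
      rw [hmlen] at this
      exact this
    have hj1lt : (j + 1).toNat < pool.length := by omega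
    have hgetp : PySem.List.pyGetD pool (j + 1) (0, 0) = pool[(j + 1).toNat] :=
      PySem.List.pyGetD_eq_getElem pool (0, 0) (by omega) (by omega)
    have hacc : dd (dd [] (flatP (pool.take (j + 1).toNat)))
        (flatP (pvComboYield pool (PySem.List.pyRange 0 (m - 1) 1 ++ [j + 1])))
        = dd [] (flatP (pool.take (j + 1 + 1).toNat)) := by
      rw [hyield, hgetp]
      have hfl : flatP (pool.take (m - 1).toNat ++ [pool[(j + 1).toNat]])
          = flatP (pool.take (m - 1).toNat) ++ fp pool[(j + 1).toNat] := by
        simp [flatP]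
      rw [hfl, dd_append]
      have hnop : dd (dd [] (flatP (pool.take (j + 1).toNat))) (flatP (pool.take (m - 1).toNat))
          = dd [] (flatP (pool.take (j + 1).toNat)) := by
        apply dd_nop
        intro z hz
        rw [mem_dd]
        right
        simp only [flatP, List.mem_flatMap] at hz ⊢
        obtain ⟨y, hy, hzy⟩ := hz
        exact ⟨y, (List.take_prefix_take_left (by omega : (m - 1).toNat ≤ (j + 1).toNat)).subset hy, hzy⟩
      rw [hnop, ← dd_append]
      have htake : flatP (pool.take (j + 1 + 1).toNat)
          = flatP (pool.take (j + 1).toNat) ++ fp pool[(j + 1).toNat] := by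
        have h1 : (j + 1 + 1).toNat = (j + 1).toNat + 1 := by omega
        rw [h1, List.take_succ, List.getElem?_eq_getElem hj1lt]
        simp only [Option.toList_some, flatP, List.flatMap_append, List.flatMap_cons,
          List.flatMap_nil, List.append_nil]
      rw [htake]
    rw [hacc]
    exact ih f (j + 1) (by omega) (by omega) (by omega)

lemma bfold (rest : List Int) : rest.Pairwise (· < ·) →
    ∀ (acc : List Int) (p : Int), (∀ x ∈ acc, x ≤ p) → p ∈ acc → (∀ i ∈ rest, p ≤ i) →
      (rest.foldl
        (fun (st : List Int × Option Int) i =>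
          ((if st.2 ≠ some i then st.1 ++ [i] else st.1) ++ [i + 1], some (i + 1)))
        (acc, some p)).1
      = dd acc (rest.flatMap (fun c => [c, c + 1])) := by
  induction rest with
  | nil => intro _ acc p _ _ _; rfl
  | cons w rest ih =>
    intro hpw acc p hle hmem hmin
    obtain ⟨hw, hpw'⟩ := List.pairwise_cons.1 hpw
    have hpwle : p ≤ w := hmin w (by simp)
    have hflat : (w :: rest).flatMap (fun c => [c, c + 1])
        = [w, w + 1] ++ rest.flatMap (fun c => [c, c + 1]) := by simp
    rw [hflat, dd_append, List.foldl_cons]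
    by_cases hpweq : p = w
    · subst hpweq
      have hdd : dd acc [p, p + 1] = acc ++ [p + 1] := by
        have h1 : dd acc [p, p + 1] = dd (if p ∈ acc then acc else acc ++ [p]) [p + 1] := rfl
        rw [h1, if_pos hmem]
        have h2 : dd acc [p + 1] = if p + 1 ∈ acc then acc else acc ++ [p + 1] := rfl
        rw [h2, if_neg (show p + 1 ∉ acc from fun hc => by have := hle _ hc; omega)]
      rw [hdd, if_neg (by simp)]
      exact ih hpw' (acc ++ [p + 1]) (p + 1)
        (fun x hx => by rcases List.mem_append.1 hx with h | h
                        · exact le_trans (hle x h) (by omega)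
                        · simp at h; omega)
        (by simp)
        (fun i hi => by have := hw i hi; omega)
    · have hplt : p < w := lt_of_le_of_ne hpwle hpweq
      have hwnotin : w ∉ acc := fun hc => absurd (hle _ hc) (by omega)
      have hdd : dd acc [w, w + 1] = (acc ++ [w]) ++ [w + 1] := by
        have h1 : dd acc [w, w + 1] = dd (if w ∈ acc then acc else acc ++ [w]) [w + 1] := rfl
        rw [h1, if_neg hwnotin]
        have h2 : dd (acc ++ [w]) [w + 1] = if w + 1 ∈ acc ++ [w] then acc ++ [w] else (acc ++ [w]) ++ [w + 1] := rfl
        rw [h2, if_neg (show w + 1 ∉ acc ++ [w] from fun hc => by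
          rcases List.mem_append.1 hc with h | h
          · have := hle _ h; omega
          · simp at h)]
      rw [hdd, if_pos (show some p ≠ some w by simpa using hpweq)]
      exact ih hpw' ((acc ++ [w]) ++ [w + 1]) (w + 1)
        (fun x hx => by
          rcases List.mem_append.1 hx with h | h
          · rcases List.mem_append.1 h with h' | h'
            · exact le_trans (hle x h') (by omega)
            · simp at h'; omega
          · simp at h; omega)
        (by simp)
        (fun i hi => by have := hw i hi; omega)

lemma bside (F : List Int) (hpw : F.Pairwise (· < ·)) :
    F ≠ [] →
    (F.foldl
        (fun (st : List Int × Option Int) i =>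
          ((if st.2 ≠ some i then st.1 ++ [i] else st.1) ++ [i + 1], some (i + 1)))
        ([], none)).1
      = dd [] (F.flatMap (fun c => [c, c + 1])) := by
  cases F with
  | nil => intro h; exact absurd rfl h
  | cons w rest =>
    intro _
    obtain ⟨hw, hpw'⟩ := List.pairwise_cons.1 hpw
    rw [List.foldl_cons]
    show (rest.foldl _ ([w, w + 1], some (w + 1))).1 = _
    have hflat : (w :: rest).flatMap (fun c => [c, c + 1])
        = [w, w + 1] ++ rest.flatMap (fun c => [c, c + 1]) := by simp
    rw [hflat, dd_append]
    have hdd : dd [] [w, w + 1] = [w, w + 1] := by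
      have h1 : dd ([] : List Int) [w, w + 1] = dd [w] [w + 1] := by
        show dd (if w ∈ ([] : List Int) then [] else [] ++ [w]) [w + 1] = dd [w] [w + 1]
        rw [if_neg (List.not_mem_nil)]
        rfl
      rw [h1]
      show (if w + 1 ∈ [w] then [w] else [w] ++ [w + 1]) = [w, w + 1]
      rw [if_neg (by simp)]
      rfl
    rw [hdd]
    exact bfold rest hpw' [w, w + 1] (w + 1)
      (fun x hx => by simp at hx; omega)
      (by simp)
      (fun i hi => by have := hw i hi; omega)

lemma aside (pool : List (Int × Int)) (moves : Int) (hm1 : 1 ≤ moves)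
    (hmn : moves ≤ (pool.length : Int)) :
    (pvComboYield pool (PySem.List.pyRange 0 moves 1) ::
        pvCombosAux pool (pool.length : Int) moves (PySem.List.pyRange 0 moves 1)
          ((pool.length + 1) ^ moves.toNat)).foldl
      (fun acc x => dd acc (flatP x)) []
    = dd [] (flatP pool) := by
  have hsplit : PySem.List.pyRange 0 moves 1
      = PySem.List.pyRange 0 (moves - 1) 1 ++ [moves - 1] := by
    have h := PySem.List.pyRange_one_succ_right (a := 0) (b := moves - 1) (by omega)
    rw [show moves - 1 + 1 = moves by ring] at h
    exact h
  have hmlt : (moves - 1).toNat < pool.length := by omega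
  have hy : pvComboYield pool (PySem.List.pyRange 0 moves 1)
      = pool.take (moves - 1).toNat ++ [PySem.List.pyGetD pool (moves - 1) (0, 0)] := by
    rw [hsplit]
    unfold pvComboYield
    rw [List.map_append, List.map_singleton]
    congr 1
    have h := mapGetRange (moves - 1).toNat pool (0, 0) (by omega)
    rw [show (((moves - 1).toNat : Nat) : Int) = moves - 1 by omega] at h
    exact h
  have hgetp : PySem.List.pyGetD pool (moves - 1) (0, 0) = pool[(moves - 1).toNat] :=
    PySem.List.pyGetD_eq_getElem pool (0, 0) (by omega) (by omega)
  rw [List.foldl_cons]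
  have hacc : dd [] (flatP (pvComboYield pool (PySem.List.pyRange 0 moves 1)))
      = dd [] (flatP (pool.take ((moves - 1) + 1).toNat)) := by
    rw [hy, hgetp]
    have htake : flatP (pool.take ((moves - 1) + 1).toNat)
        = flatP (pool.take (moves - 1).toNat) ++ fp pool[(moves - 1).toNat] := by
      have h1 : ((moves - 1) + 1).toNat = (moves - 1).toNat + 1 := by omega
      rw [h1, List.take_succ, List.getElem?_eq_getElem hmlt]
      simp only [Option.toList_some, flatP, List.flatMap_append, List.flatMap_cons,
        List.flatMap_nil, List.append_nil]
    have hfl : flatP (pool.take (moves - 1).toNat ++ [pool[(moves - 1).toNat]])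
        = flatP (pool.take (moves - 1).toNat) ++ fp pool[(moves - 1).toNat] := by
      simp only [flatP, List.flatMap_append, List.flatMap_cons, List.flatMap_nil,
        List.append_nil]
    rw [hfl, ← htake]
  rw [hacc, hsplit]
  have hfuel : (((pool.length : Int) - moves).toNat : Nat) ≤ (pool.length + 1) ^ moves.toNat := by
    have h1 : pool.length + 1 ≤ (pool.length + 1) ^ moves.toNat :=
      Nat.le_self_pow (by omega) _
    omega
  exact sweep pool (pool.length : Int) moves rfl hm1 hmn ((pool.length : Int) - moves).toNat _
    (moves - 1) (by omega) (by omega) hfuel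

lemma identify_eq (Chain Subchain : String) :
    pvIdentifyLetters Chain Subchain
      = ((PySem.List.pyRange 0 ((Chain.toList.length : Int) - 1) 1).filter
            (pvPairNe Chain Subchain)).map (fun c => (c, c + 1)) := by
  unfold pvIdentifyLetters
  have hfun : ∀ (acc : List (Int × Int)), ∀ c ∈ PySem.List.pyRange 0 (Chain.toList.length : Int) 1,
      (if c + 1 < (Chain.toList.length : Int) then
          if pvPairNe Chain Subchain c then acc ++ [(c, c + 1)] else acc
        else acc)
      = if (decide (c + 1 < (Chain.toList.length : Int)) && pvPairNe Chain Subchain c) then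
          acc ++ [(c, c + 1)] else acc := by
    intro acc c _
    by_cases h1 : c + 1 < (Chain.toList.length : Int)
    · rw [if_pos h1, decide_eq_true h1, Bool.true_and]
    · rw [if_neg h1, decide_eq_false h1, Bool.false_and,
        if_neg (show ¬(false = true) by simp)]
  rw [PySem.List.foldl_congr_mem _ _ _ [] hfun, PySem.List.foldl_append_if]
  simp only [List.nil_append]
  congr 1
  by_cases hL0 : (Chain.toList.length : Int) ≤ 0
  · rw [PySem.List.pyRange_one_eq_nil hL0, PySem.List.pyRange_one_eq_nil (by omega)]
    rfl
  · have hsp : PySem.List.pyRange 0 (Chain.toList.length : Int) 1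
        = PySem.List.pyRange 0 ((Chain.toList.length : Int) - 1) 1
            ++ [(Chain.toList.length : Int) - 1] := by
      have h := PySem.List.pyRange_one_succ_right (a := 0)
        (b := (Chain.toList.length : Int) - 1) (by omega)
      rw [show (Chain.toList.length : Int) - 1 + 1 = (Chain.toList.length : Int) by ring] at h
      exact h
    rw [hsp, List.filter_append]
    have hlast : List.filter
        (fun c => decide (c + 1 < (Chain.toList.length : Int)) && pvPairNe Chain Subchain c)
        [(Chain.toList.length : Int) - 1] = [] := by
      simp only [List.filter_cons, List.filter_nil]
      rw [decide_eq_false (show ¬((Chain.toList.length : Int) - 1 + 1 < (Chain.toList.length : Int))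
        by omega), Bool.false_and]
      rfl
    rw [hlast, List.append_nil]
    apply List.filter_congr
    intro c hc
    have hcm := (PySem.List.mem_pyRange_one).1 hc
    rw [decide_eq_true (show c + 1 < (Chain.toList.length : Int) by omega), Bool.true_and]

-- ===== VERDICT (by name: the statement is the Claim_ definition above) =====
theorem individual_options_spec : Claim_equal_individual_options := by
  intro Chain Subchain moves _
  unfold Spec_individual_options individual_options individual_options_alt pvAllPos
  rw [PySem.List.foldl_append_singleton_eq_self]
  simp only [List.nil_append]
  rw [foldA_eq, identify_eq Chain Subchain]
  set F : List Int := (PySem.List.pyRange 0 ((Chain.toList.length : Int) - 1) 1).filter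
    (pvPairNe Chain Subchain) with hF
  set pool : List (Int × Int) := F.map (fun c => (c, c + 1)) with hpool
  have hplen : pool.length = F.length := by rw [hpool, List.length_map]
  have hflatpool : flatP pool = F.flatMap (fun c => [c, c + 1]) := by
    rw [hpool]
    simp [flatP, List.flatMap_map, fp]
  unfold pvCombination
  by_cases hgt : (pool.length : Int) < moves
  · rw [if_pos hgt, if_pos (Or.inr (by rw [← hplen]; exact hgt))]
    rfl
  · rw [if_neg hgt]
    by_cases hm0 : moves ≤ 0
    · rw [if_pos (Or.inl hm0)]
      rw [PySem.List.pyRange_one_eq_nil hm0]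
      have hfb : pvFindBreak [] (pool.length : Int) moves = none := by
        unfold pvFindBreak
        rw [PySem.List.pyRange_neg_one_eq_nil (by omega)]
        rfl
      have haux : ∀ fuel, pvCombosAux pool (pool.length : Int) moves [] fuel = [] := by
        intro fuel
        cases fuel with
        | zero => rfl
        | succ f => rw [pvCombosAux, hfb]
      show List.foldl (fun acc x => dd acc (flatP x)) []
        (pvComboYield pool [] ::
          pvCombosAux pool (pool.length : Int) moves [] ((pool.length + 1) ^ moves.toNat)) = []
      rw [haux]
      rfl
    · have hm1 : 1 ≤ moves := by omega
      have hmn : moves ≤ (pool.length : Int) := by omega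
      rw [if_neg (show ¬(moves ≤ 0 ∨ (F.length : Int) < moves) by rw [← hplen]; omega)]
      have hpw : F.Pairwise (· < ·) := by
        rw [hF]
        exact List.Pairwise.filter _ (PySem.List.pairwise_lt_pyRange_one 0 _)
      have hFne : F ≠ [] := by
        intro hc
        rw [hc] at hplen
        simp at hplen
        rw [hplen] at hmn
        simp at hmn
        omega
      rw [bside F hpw hFne, ← hflatpool]
      exact aside pool moves hm1 hmn
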